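-- pv_equiv track=rewrite | github.com/smithdanieldavid-cpu/atlas-dashboard | update_atlas.py | _update_indicator_sources
-- ===== SOURCE A (Python) =====
-- def _update_indicator_sources(indicators):
--     """Adds correct source links to indicators based on their fetch method."""
--     YFINANCE_BASE = "https://finance.yahoo.com/quote/"
--     FINRA_LINK = "https://www.finra.org/investors/market-and-financial-data/margin-statistics"
--
--     # Map indicator IDs to their YFinance ticker symbols (for source links)
--     YFINANCE_SOURCES = {
--         "VIX": YFINANCE_BASE + "%5EVIX/", "GOLD_PRICE": YFINANCE_BASE + "GLD/",
--         "SPX_INDEX": YFINANCE_BASE + "%5EGSPC/", "ASX_200": YFINANCE_BASE + "%5EAXJO/",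
--         "WTI_CRUDE": YFINANCE_BASE + "USO/", "AUDUSD": YFINANCE_BASE + "AUDUSD=X/",
--         "SMALL_LARGE_RATIO": YFINANCE_BASE + "%5ERUT/",
--     }
--
--     # Special case for FRED, Polygon, and Calculated Indicators
--     FRED_SOURCES = {
--         "3Y_YIELD": "https://fred.stlouisfed.org/series/DGS3",
--         "30Y_YIELD": "https://fred.stlouisfed.org/series/DGS30",
--         "10Y_YIELD": "https://fred.stlouisfed.org/series/DGS10",
--         "HY_OAS": "https://fred.stlouisfed.org/series/BAMLH0A0HYM2",
--         "TREASURY_LIQUIDITY": "https://fred.stlouisfed.org/series/WALCL",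
--         "SOFR_OIS": "https://fred.stlouisfed.org/series/SOFR3MAD",
--         "SNAP_BENEFITS": "https://fred.stlouisfed.org/series/SNPTA" # Updated FRED ID for SNAP
--     }
--
--     POLYGON_SOURCES = {
--         "PUT_CALL_RATIO": "https://polygon.io/docs/options/get_v2_aggs_ticker__tickervar__prev",
--     }
--
--     AV_SOURCES = {
--         "EURUSD": "https://www.alphavantage.co/documentation/#currency-exchange",
--     }
--
--     CUSTOM_SOURCES = {
--         "MARGIN_DEBT_YOY": FINRA_LINK,
--         "FISCAL_RISK": "Composite/Internal Model (VIX, SNAP, CPI)",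
--         "GEOPOLITICAL": "Manual Input/Qualitative Assessment"
--     }
--
--     for indicator in indicators:
--         indicator_id = indicator["id"]
--
--         if indicator_id in YFINANCE_SOURCES:
--             indicator["source_link"] = YFINANCE_SOURCES[indicator_id]
--         elif indicator_id in FRED_SOURCES:
--             indicator["source_link"] = FRED_SOURCES[indicator_id]
--         elif indicator_id in POLYGON_SOURCES:
--             indicator["source_link"] = POLYGON_SOURCES[indicator_id]
--         elif indicator_id in AV_SOURCES:
--             indicator["source_link"] = AV_SOURCES[indicator_id]
--         elif indicator_id in CUSTOM_SOURCES:
--             indicator["source_link"] = CUSTOM_SOURCES[indicator_id]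
--         else:
--             indicator["source_link"] = indicator.get("source_link", "N/A")
--
--     return indicators
-- ===== SOURCE B (Python) =====
-- def _update_indicator_sources(indicators):
--     """Adds correct source links to indicators based on their fetch method.
--
--     Inverted join: first a pass applying the fallback (keep an existing
--     source_link, else "N/A") to every indicator; then iterate over the table
--     of known sources and push each link onto the indicators whose id matches.
--     Correct because the source ids are disjoint and overwriting a dict key
--     keeps its position. Mutates the dicts in place like the original.
--     """
--     SOURCES = [
--         ("VIX", "https://finance.yahoo.com/quote/%5EVIX/"),
--         ("GOLD_PRICE", "https://finance.yahoo.com/quote/GLD/"),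
--         ("SPX_INDEX", "https://finance.yahoo.com/quote/%5EGSPC/"),
--         ("ASX_200", "https://finance.yahoo.com/quote/%5EAXJO/"),
--         ("WTI_CRUDE", "https://finance.yahoo.com/quote/USO/"),
--         ("AUDUSD", "https://finance.yahoo.com/quote/AUDUSD=X/"),
--         ("SMALL_LARGE_RATIO", "https://finance.yahoo.com/quote/%5ERUT/"),
--         ("3Y_YIELD", "https://fred.stlouisfed.org/series/DGS3"),
--         ("30Y_YIELD", "https://fred.stlouisfed.org/series/DGS30"),
--         ("10Y_YIELD", "https://fred.stlouisfed.org/series/DGS10"),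
--         ("HY_OAS", "https://fred.stlouisfed.org/series/BAMLH0A0HYM2"),
--         ("TREASURY_LIQUIDITY", "https://fred.stlouisfed.org/series/WALCL"),
--         ("SOFR_OIS", "https://fred.stlouisfed.org/series/SOFR3MAD"),
--         ("SNAP_BENEFITS", "https://fred.stlouisfed.org/series/SNPTA"),
--         ("PUT_CALL_RATIO", "https://polygon.io/docs/options/get_v2_aggs_ticker__tickervar__prev"),
--         ("EURUSD", "https://www.alphavantage.co/documentation/#currency-exchange"),
--         ("MARGIN_DEBT_YOY", "https://www.finra.org/investors/market-and-financial-data/margin-statistics"),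
--         ("FISCAL_RISK", "Composite/Internal Model (VIX, SNAP, CPI)"),
--         ("GEOPOLITICAL", "Manual Input/Qualitative Assessment"),
--     ]
--     for indicator in indicators:
--         indicator["source_link"] = indicator.get("source_link", "N/A")
--     for key, link in SOURCES:
--         for indicator in indicators:
--             if indicator["id"] == key:
--                 indicator["source_link"] = link
--     return indicators
-- ===== Notes on version B (the rewrite author's own statement) =====
-- stated objective: alternative
-- what changed: Inverts the join: a first pass applies the fallback (existing source_link or 'N/A') to every indicator, then the loop runs over the known-source table assigning each link to the indicators whose id matches, instead of a per-indicator five-way elif lookup chain.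
import Mathlib
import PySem

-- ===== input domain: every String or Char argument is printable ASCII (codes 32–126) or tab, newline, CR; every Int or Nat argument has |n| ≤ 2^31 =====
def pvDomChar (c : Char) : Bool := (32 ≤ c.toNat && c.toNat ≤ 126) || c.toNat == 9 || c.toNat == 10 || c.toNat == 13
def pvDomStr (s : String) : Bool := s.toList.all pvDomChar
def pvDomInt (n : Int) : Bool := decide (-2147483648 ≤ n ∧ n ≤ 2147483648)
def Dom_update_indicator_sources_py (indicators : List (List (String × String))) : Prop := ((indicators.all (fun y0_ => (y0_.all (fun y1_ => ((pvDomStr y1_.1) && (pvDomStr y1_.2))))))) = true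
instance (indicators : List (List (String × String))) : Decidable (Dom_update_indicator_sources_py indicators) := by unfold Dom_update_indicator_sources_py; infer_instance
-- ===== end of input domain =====

-- B inverts the join: a first pass applies the fallback to every indicator, then the loop runs over
-- the known-source table and assigns each link to the matching indicators (objective: alternative).
-- Both Pythons mutate the indicator dicts in place and return the same list; the equivalence proved
-- here is about the RETURN value.

-- ===== PORT A =====
def pvYF : List (String × String) :=
  [("VIX", "https://finance.yahoo.com/quote/%5EVIX/"),
   ("GOLD_PRICE", "https://finance.yahoo.com/quote/GLD/"),
   ("SPX_INDEX", "https://finance.yahoo.com/quote/%5EGSPC/"),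
   ("ASX_200", "https://finance.yahoo.com/quote/%5EAXJO/"),
   ("WTI_CRUDE", "https://finance.yahoo.com/quote/USO/"),
   ("AUDUSD", "https://finance.yahoo.com/quote/AUDUSD=X/"),
   ("SMALL_LARGE_RATIO", "https://finance.yahoo.com/quote/%5ERUT/")]

def pvFRED : List (String × String) :=
  [("3Y_YIELD", "https://fred.stlouisfed.org/series/DGS3"),
   ("30Y_YIELD", "https://fred.stlouisfed.org/series/DGS30"),
   ("10Y_YIELD", "https://fred.stlouisfed.org/series/DGS10"),
   ("HY_OAS", "https://fred.stlouisfed.org/series/BAMLH0A0HYM2"),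
   ("TREASURY_LIQUIDITY", "https://fred.stlouisfed.org/series/WALCL"),
   ("SOFR_OIS", "https://fred.stlouisfed.org/series/SOFR3MAD"),
   ("SNAP_BENEFITS", "https://fred.stlouisfed.org/series/SNPTA")]

def pvPOLY : List (String × String) :=
  [("PUT_CALL_RATIO", "https://polygon.io/docs/options/get_v2_aggs_ticker__tickervar__prev")]

def pvAV : List (String × String) :=
  [("EURUSD", "https://www.alphavantage.co/documentation/#currency-exchange")]

def pvCUSTOM : List (String × String) :=
  [("MARGIN_DEBT_YOY", "https://www.finra.org/investors/market-and-financial-data/margin-statistics"),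
   ("FISCAL_RISK", "Composite/Internal Model (VIX, SNAP, CPI)"),
   ("GEOPOLITICAL", "Manual Input/Qualitative Assessment")]

-- A's per-indicator body: the five-way elif chain ('id in D' + 'D[id]' = get?).
def pvStepA (indicator : List (String × String)) : List (String × String) :=
  match (PySem.Dict.mk indicator).get? "id" with
  | none => indicator        -- KeyError in Python; excluded by Pre_
  | some indicator_id =>
    match (PySem.Dict.mk pvYF).get? indicator_id with
    | some v => ((PySem.Dict.mk indicator).insert "source_link" v).items
    | none =>
      match (PySem.Dict.mk pvFRED).get? indicator_id with
      | some v => ((PySem.Dict.mk indicator).insert "source_link" v).items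
      | none =>
        match (PySem.Dict.mk pvPOLY).get? indicator_id with
        | some v => ((PySem.Dict.mk indicator).insert "source_link" v).items
        | none =>
          match (PySem.Dict.mk pvAV).get? indicator_id with
          | some v => ((PySem.Dict.mk indicator).insert "source_link" v).items
          | none =>
            match (PySem.Dict.mk pvCUSTOM).get? indicator_id with
            | some v => ((PySem.Dict.mk indicator).insert "source_link" v).items
            | none => ((PySem.Dict.mk indicator).insert "source_link" ((PySem.Dict.mk indicator).getD "source_link" "N/A")).items

def update_indicator_sources_py (indicators : List (List (String × String))) : List (List (String × String)) :=
  indicators.map pvStepA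

-- ===== PORT B =====
-- The flat known-source table B iterates over.
def pvSOURCES : List (String × String) :=
  [("VIX", "https://finance.yahoo.com/quote/%5EVIX/"),
   ("GOLD_PRICE", "https://finance.yahoo.com/quote/GLD/"),
   ("SPX_INDEX", "https://finance.yahoo.com/quote/%5EGSPC/"),
   ("ASX_200", "https://finance.yahoo.com/quote/%5EAXJO/"),
   ("WTI_CRUDE", "https://finance.yahoo.com/quote/USO/"),
   ("AUDUSD", "https://finance.yahoo.com/quote/AUDUSD=X/"),
   ("SMALL_LARGE_RATIO", "https://finance.yahoo.com/quote/%5ERUT/"),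
   ("3Y_YIELD", "https://fred.stlouisfed.org/series/DGS3"),
   ("30Y_YIELD", "https://fred.stlouisfed.org/series/DGS30"),
   ("10Y_YIELD", "https://fred.stlouisfed.org/series/DGS10"),
   ("HY_OAS", "https://fred.stlouisfed.org/series/BAMLH0A0HYM2"),
   ("TREASURY_LIQUIDITY", "https://fred.stlouisfed.org/series/WALCL"),
   ("SOFR_OIS", "https://fred.stlouisfed.org/series/SOFR3MAD"),
   ("SNAP_BENEFITS", "https://fred.stlouisfed.org/series/SNPTA"),
   ("PUT_CALL_RATIO", "https://polygon.io/docs/options/get_v2_aggs_ticker__tickervar__prev"),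
   ("EURUSD", "https://www.alphavantage.co/documentation/#currency-exchange"),
   ("MARGIN_DEBT_YOY", "https://www.finra.org/investors/market-and-financial-data/margin-statistics"),
   ("FISCAL_RISK", "Composite/Internal Model (VIX, SNAP, CPI)"),
   ("GEOPOLITICAL", "Manual Input/Qualitative Assessment")]

-- pass 1: indicator["source_link"] = indicator.get("source_link", "N/A")
def pvDefault (indicator : List (String × String)) : List (String × String) :=
  ((PySem.Dict.mk indicator).insert "source_link" ((PySem.Dict.mk indicator).getD "source_link" "N/A")).items

-- pass 2 body: if indicator["id"] == key: indicator["source_link"] = link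
def pvAssign (key link : String) (indicator : List (String × String)) : List (String × String) :=
  match (PySem.Dict.mk indicator).get? "id" with
  | none => indicator        -- KeyError in Python; excluded by Pre_
  | some indicator_id =>
    if indicator_id == key then ((PySem.Dict.mk indicator).insert "source_link" link).items
    else indicator

def update_indicator_sources_py_alt (indicators : List (List (String × String))) : List (List (String × String)) :=
  pvSOURCES.foldl (fun lst e => lst.map (pvAssign e.1 e.2)) (indicators.map pvDefault)

-- ===== PRECONDITION & SPEC =====
-- Pre_ excludes indicators without an "id" key, on which Python A raises KeyError.
def Pre_update_indicator_sources_py (indicators : List (List (String × String))) : Prop :=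
  ∀ ind ∈ indicators, "id" ∈ ind.map Prod.fst

instance (indicators : List (List (String × String))) : Decidable (Pre_update_indicator_sources_py indicators) := by
  unfold Pre_update_indicator_sources_py; infer_instance

def pvWitness_update_indicator_sources_py : (List (List (String × String))) :=
  [[("id", "VIX")], [("id", "FOO"), ("source_link", "x")]]

def Spec_update_indicator_sources_py (indicators : List (List (String × String))) (out : List (List (String × String))) : Prop := out = update_indicator_sources_py_alt indicators
instance (indicators : List (List (String × String))) (out : List (List (String × String))) : Decidable (Spec_update_indicator_sources_py indicators out) := by unfold Spec_update_indicator_sources_py; infer_instance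

-- ===== CLAIM =====
def Claim_equal_update_indicator_sources_py : Prop := ∀ (indicators : List (List (String × String))), Dom_update_indicator_sources_py indicators → Pre_update_indicator_sources_py indicators → Spec_update_indicator_sources_py indicators (update_indicator_sources_py indicators)

-- ===== LEMMAS AND PROOFS =====

-- a fold of per-element maps is the map of the per-element folds
theorem pv_foldl_map_comm {α β : Type} (f : β → α → α) (l : List β) (xs : List α) :
    l.foldl (fun lst e => lst.map (f e)) xs = xs.map (fun x => l.foldl (fun x e => f e x) x) := by
  induction l generalizing xs with
  | nil => simp
  | cons e rest ih =>
    simp only [List.foldl_cons, ih, List.map_map]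
    rfl

-- an assignment pass whose key never matches leaves the indicator unchanged
theorem pv_foldl_assign_miss (entries : List (String × String)) (x : List (String × String))
    (id : String) (hx : (PySem.Dict.mk x).get? "id" = some id) (h : id ∉ entries.map Prod.fst) :
    entries.foldl (fun a e => pvAssign e.1 e.2 a) x = x := by
  induction entries with
  | nil => rfl
  | cons e rest ih =>
    obtain ⟨k, l⟩ := e
    simp only [List.map_cons, List.mem_cons, not_or] at h
    have hstep : pvAssign k l x = x := by
      simp [pvAssign, hx, h.1]
    rw [List.foldl_cons, hstep]
    exact ih h.2

-- the whole assignment pass over a table with distinct keys = one lookup-and-insert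
theorem pv_foldl_assign (entries : List (String × String)) (x : List (String × String))
    (id : String) (hx : (PySem.Dict.mk x).get? "id" = some id)
    (hnd : (entries.map Prod.fst).Nodup) :
    entries.foldl (fun a e => pvAssign e.1 e.2 a) x =
      match (PySem.Dict.mk entries).get? id with
      | some l => ((PySem.Dict.mk x).insert "source_link" l).items
      | none => x := by
  induction entries with
  | nil => rfl
  | cons e rest ih =>
    obtain ⟨k, l⟩ := e
    simp only [List.map_cons, List.nodup_cons] at hnd
    by_cases hk : id = k
    · subst hk
      have hxi : (PySem.Dict.mk (((PySem.Dict.mk x).insert "source_link" l).items)).get? "id" = some id := by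
        have : (PySem.Dict.mk (((PySem.Dict.mk x).insert "source_link" l).items)) =
            (PySem.Dict.mk x).insert "source_link" l := rfl
        rw [this, PySem.Dict.get?_insert_of_ne _ _ (by decide)]
        exact hx
      have hstep : pvAssign id l x = ((PySem.Dict.mk x).insert "source_link" l).items := by
        simp [pvAssign, hx]
      rw [List.foldl_cons, hstep, pv_foldl_assign_miss rest _ id hxi hnd.1]
      simp [PySem.Dict.get?_mk_cons]
    · have hstep : pvAssign k l x = x := by
        simp [pvAssign, hx, hk]
      rw [List.foldl_cons, hstep, ih hnd.2]
      have hkne : (k == id) = false := by simp [beq_eq_false_iff_ne]; exact fun h => hk h.symm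
      simp [PySem.Dict.get?_mk_cons, hkne]

-- first-match lookup distributes over list concatenation
theorem pv_get?_mk_append (l1 l2 : List (String × String)) (k : String) :
    (PySem.Dict.mk (l1 ++ l2)).get? k =
      ((PySem.Dict.mk l1).get? k).elim ((PySem.Dict.mk l2).get? k) some := by
  induction l1 with
  | nil => simp [PySem.Dict.get?]
  | cons p rest ih =>
    cases p with
    | mk a b =>
      rw [List.cons_append, PySem.Dict.get?_mk_cons, PySem.Dict.get?_mk_cons]
      by_cases h : (a == k) = true
      · simp [h]
      · simp only [Bool.not_eq_true] at h
        simp [h, ih]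

theorem pv_sources_split : pvSOURCES = pvYF ++ pvFRED ++ pvPOLY ++ pvAV ++ pvCUSTOM := by rfl

-- B's two passes on one indicator = A's elif chain on it (given the indicator has an "id" key)
theorem pv_pointwise (ind : List (String × String)) (hid : "id" ∈ ind.map Prod.fst) :
    pvSOURCES.foldl (fun a e => pvAssign e.1 e.2 a) (pvDefault ind) = pvStepA ind := by
  obtain ⟨id, hx⟩ : ∃ id, (PySem.Dict.mk ind).get? "id" = some id := by
    cases hcase : (PySem.Dict.mk ind).get? "id" with
    | some v => exact ⟨v, rfl⟩
    | none =>
      rw [PySem.Dict.get?_eq_none_iff_not_mem_keys] at hcase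
      exact absurd hid hcase
  have hxd : (PySem.Dict.mk (pvDefault ind)).get? "id" = some id := by
    have : (PySem.Dict.mk (pvDefault ind)) =
        (PySem.Dict.mk ind).insert "source_link" ((PySem.Dict.mk ind).getD "source_link" "N/A") := rfl
    rw [this, PySem.Dict.get?_insert_of_ne _ _ (by decide)]
    exact hx
  have hnd : (pvSOURCES.map Prod.fst).Nodup := by decide
  have hfold := pv_foldl_assign pvSOURCES (pvDefault ind) id hxd hnd
  have hcollapse : ∀ l : String,
      ((PySem.Dict.mk (pvDefault ind)).insert "source_link" l).items =
        ((PySem.Dict.mk ind).insert "source_link" l).items := by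
    intro l
    have : (PySem.Dict.mk (pvDefault ind)) =
        (PySem.Dict.mk ind).insert "source_link" ((PySem.Dict.mk ind).getD "source_link" "N/A") := rfl
    rw [this, PySem.Dict.insert_insert_self]
  rw [hfold]
  unfold pvStepA
  rw [hx]
  simp only [pv_sources_split, pv_get?_mk_append]
  cases h1 : (PySem.Dict.mk pvYF).get? id <;>
    cases h2 : (PySem.Dict.mk pvFRED).get? id <;>
      cases h3 : (PySem.Dict.mk pvPOLY).get? id <;>
        cases h4 : (PySem.Dict.mk pvAV).get? id <;>
          cases h5 : (PySem.Dict.mk pvCUSTOM).get? id <;>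
            simp only [Option.elim] <;> first | rfl | exact hcollapse _

-- ===== VERDICT (by name: the statement is the Claim_ definition above) =====
theorem update_indicator_sources_py_spec : Claim_equal_update_indicator_sources_py := by
  intro indicators _ hpre
  unfold Spec_update_indicator_sources_py update_indicator_sources_py update_indicator_sources_py_alt
  rw [pv_foldl_map_comm, List.map_map]
  apply List.map_congr_left
  intro ind hmem
  simp only [Function.comp]
  exact (pv_pointwise ind (hpre ind hmem)).symm
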